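-- pv_equiv track=rewrite | github.com/apollojain/driver_interview | analyze_fragment.py | stitch_fragments_helper_2
-- ===== SOURCE A (Python) =====
-- def helper_fragment(main_frag, frag):
-- 	'''
-- 	DESCRIPTION
-- 	-----------
-- 	given a string main_frag, this function tries to string match
-- 	a portion of the beginning of frag and makes sure that it matches with something
-- 	inside of main_frag. Then it does the same thing for the beginning of main_frag
-- 	and the end of the actual frag, so that you can make sure that's good too.
-- 	The goal is to try to find the largest beginning substring
-- 	of frag that falls into main_frag, and just append the part of frag that does
-- 	not intersect with main_frag
--
-- 	INPUT PARAMETERS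
-- 	----------------
-- 	main_frag: String
-- 		The actual string (Genomic Sequence) that you are uploading into the web application
-- 	frag: String
-- 		The subportion of the string that you will be adding to the
--
-- 	OUTPUT PARAMETERS
-- 	-----------------
-- 	remainder_tuple: tuple
-- 		[0]: Where the new string should be placed in the genome
-- 		[1]: The part of the genomic sequence frag that does not lie inside
-- 		of the main_frag
-- 		[2]: The number of common elements
-- 	'''
-- 	if frag in main_frag:
-- 		return ('back', "", len(frag))
-- 	i = len(frag)
-- 	while i > 0 and frag[:i] not in main_frag[-i:]:
-- 		i -= 1
-- 	back_string = frag[i:]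
-- 	back_tuple = ("back", back_string, i)
--
-- 	j = 0
-- 	while j < len(frag) and frag[-j:] not in main_frag[:j]:
-- 		j += 1
--
-- 	front_string = frag[:-j]
-- 	front_tuple = ("front", front_string, j)
-- 	if len(front_tuple[1]) < len(back_tuple[1]) and front_tuple[1] != '':
-- 		return front_tuple
-- 	else:
-- 		return back_tuple
--
-- def stitch_fragments_helper_2(f_arr):
-- 	'''
-- 	DESCRIPTION
-- 	-----------
-- 	This basically goes through all of your individual fragments in your f_arr
-- 	and gets the parts that don't overlap to get the complete genome.
--
-- 	INPUT PARAMETERS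
-- 	----------------
-- 	f_arr: List of Strings
-- 		containts all of the DNA fragments
--
-- 	OUTPUT PARAMETERS
-- 	-----------------
-- 	res: String
-- 		The complete returned DNA sequence
-- 	'''
-- 	res = ""
-- 	for frag in f_arr:
-- 		where, remainder_dna, overlap = helper_fragment(res, frag)
-- 		if where == "back":
-- 			res += remainder_dna
-- 		else:
-- 			res = remainder_dna + res
-- 	return res
-- ===== SOURCE B (Python) =====
-- # Alternative algorithm: Rabin-Karp rolling hashes for the overlap search;
-- # candidate overlaps are filtered by a hash comparison and verified by one
-- # direct comparison, so the result is exact.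
--
-- _M = (1 << 61) - 1
-- _B = 131
--
--
-- def _phash(s):
--     # h[k] = hash of s[:k]
--     h = [0]
--     for ch in s:
--         h.append((h[-1] * _B + ord(ch)) % _M)
--     return h
--
--
-- def _shash(s):
--     # h[k] = hash of s[len(s)-k:]
--     h = [0]
--     p = 1
--     for ch in reversed(s):
--         h.append((ord(ch) * p + h[-1]) % _M)
--         p = p * _B % _M
--     return h
--
--
-- def stitch_fragments_helper_2(f_arr):
--     res = ""
--     for frag in f_arr:
--         if frag in res:
--             continue
--         n, m = len(frag), len(res)
--         k = min(n, m)
--         hfp, hfs = _phash(frag), _shash(frag)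
--         hrp, hrs = _phash(res[:k]), _shash(res[m - k:])
--         i = k
--         while i > 0 and not (hfp[i] == hrs[i] and frag[:i] == res[m - i:]):
--             i -= 1
--         j = 1
--         while j < n and not (j <= m and hfs[j] == hrp[j] and frag[n - j:] == res[:j]):
--             j += 1
--         if j < n and n - j < n - i:
--             res = frag[:n - j] + res
--         else:
--             res = res + frag[i:]
--     return res
-- ===== Notes on version B (the rewrite author's own statement) =====
-- stated objective: alternative
-- what changed: Replaces A's per-candidate slice-and-substring scans for the overlap search with Rabin-Karp rolling hashes: prefix/suffix hash tables are built once per fragment, each candidate overlap is filtered by an O(1) hash comparison and only verified by one direct comparison on a hash hit.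
import Mathlib
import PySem

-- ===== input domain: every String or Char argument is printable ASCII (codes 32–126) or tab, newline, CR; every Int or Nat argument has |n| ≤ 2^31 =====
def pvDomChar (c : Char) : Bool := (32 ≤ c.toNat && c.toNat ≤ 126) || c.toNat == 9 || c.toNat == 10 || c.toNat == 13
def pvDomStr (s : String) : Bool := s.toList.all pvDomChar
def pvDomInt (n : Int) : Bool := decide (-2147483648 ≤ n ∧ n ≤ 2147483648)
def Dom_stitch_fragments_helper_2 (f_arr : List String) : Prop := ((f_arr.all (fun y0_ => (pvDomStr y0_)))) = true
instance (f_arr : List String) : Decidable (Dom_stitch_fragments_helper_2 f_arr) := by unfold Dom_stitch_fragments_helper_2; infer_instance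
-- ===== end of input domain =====

-- B replaces A's per-candidate slice-and-substring overlap scans with Rabin-Karp
-- rolling hashes (hash filter + one direct verification): a different algorithm,
-- same exact result.

-- ===== PORT A =====
-- while i > 0 and frag[:i] not in main_frag[-i:]: i -= 1
def hfBackLoop (main_frag frag : List Char) : Nat → Nat
  | 0 => 0
  | i+1 =>
    if PySem.Chars.isIn (PySem.List.slice frag none (some ((i+1 : Nat) : Int)))
        (PySem.List.slice main_frag (some (-((i+1 : Nat) : Int))) none)
    then i+1 else hfBackLoop main_frag frag i

-- while j < len(frag) and frag[-j:] not in main_frag[:j]: j += 1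
def hfFrontLoop (main_frag frag : List Char) (j : Nat) : Nat :=
  if _h : j < frag.length then
    if PySem.Chars.isIn (PySem.List.slice frag (some (-(j : Int))) none)
        (PySem.List.slice main_frag none (some (j : Int)))
    then j
    else hfFrontLoop main_frag frag (j+1)
  else j
termination_by frag.length - j

def helper_fragment (main_frag frag : List Char) : String × List Char × Int :=
  if PySem.Chars.isIn frag main_frag then ("back", [], (frag.length : Int))
  else
    let i := hfBackLoop main_frag frag frag.length
    let back_string := PySem.List.slice frag (some (i : Int)) none
    let back_tuple : String × List Char × Int := ("back", back_string, (i : Int))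
    let j := hfFrontLoop main_frag frag 0
    let front_string := PySem.List.slice frag none (some (-(j : Int)))
    let front_tuple : String × List Char × Int := ("front", front_string, (j : Int))
    if front_tuple.2.1.length < back_tuple.2.1.length ∧ front_tuple.2.1 ≠ [] then front_tuple
    else back_tuple

def stitch_fragments_helper_2 (f_arr : List String) : String :=
  String.ofList (f_arr.foldl (fun res frag =>
    let t := helper_fragment res frag.toList
    if t.1 = "back" then res ++ t.2.1 else t.2.1 ++ res) [])

-- ===== PORT B =====
def hMod : Int := 2 ^ 61 - 1
def hBase : Int := 131

-- h[k] = hash of s[:k]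
def phashArr (s : List Char) : List Int :=
  s.foldl (fun h c => h ++ [PySem.Int.mod (h.getLast! * hBase + (c.toNat : Int)) hMod]) [0]

-- h[k] = hash of s[len(s)-k:]
def shashArr (s : List Char) : List Int :=
  (s.reverse.foldl (fun hp c =>
      (hp.1 ++ [PySem.Int.mod ((c.toNat : Int) * hp.2 + hp.1.getLast!) hMod],
       PySem.Int.mod (hp.2 * hBase) hMod)) ([0], 1)).1

-- while i > 0 and not (hfp[i] == hrs[i] and frag[:i] == res[m-i:]): i -= 1
def altBackLoop (frag res : List Char) (hfp hrs : List Int) : Nat → Nat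
  | 0 => 0
  | i+1 =>
    if (hfp.getD (i+1) 0 == hrs.getD (i+1) 0) &&
       (frag.take (i+1) == res.drop (res.length - (i+1)))
    then i+1 else altBackLoop frag res hfp hrs i

-- while j < n and not (j <= m and hfs[j] == hrp[j] and frag[n-j:] == res[:j]): j += 1
def altFrontLoop (frag res : List Char) (hfs hrp : List Int) (j : Nat) : Nat :=
  if _h : j < frag.length then
    if (decide (j ≤ res.length)) && (hfs.getD j 0 == hrp.getD j 0) &&
       (frag.drop (frag.length - j) == res.take j)
    then j
    else altFrontLoop frag res hfs hrp (j+1)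
  else j
termination_by frag.length - j

def stitch_fragments_helper_2_alt (f_arr : List String) : String :=
  String.ofList (f_arr.foldl (fun res frag0 =>
    let frag := frag0.toList
    if PySem.Chars.isIn frag res then res
    else
      let n := frag.length
      let m := res.length
      let k := min n m
      let hfp := phashArr frag
      let hfs := shashArr frag
      let hrp := phashArr (res.take k)
      let hrs := shashArr (res.drop (m - k))
      let i := altBackLoop frag res hfp hrs k
      let j := altFrontLoop frag res hfs hrp 1
      if j < n ∧ n - j < n - i then frag.take (n - j) ++ res
      else res ++ frag.drop i) [])

-- ===== PRECONDITION & SPEC =====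
def Spec_stitch_fragments_helper_2 (f_arr : List String) (out : String) : Prop := out = stitch_fragments_helper_2_alt f_arr
instance (f_arr : List String) (out : String) : Decidable (Spec_stitch_fragments_helper_2 f_arr out) := by unfold Spec_stitch_fragments_helper_2; infer_instance

-- ===== CLAIM (what is proved, stated in full; the proofs are below) =====
def Claim_equal_stitch_fragments_helper_2 : Prop := ∀ (f_arr : List String), Dom_stitch_fragments_helper_2 f_arr → Spec_stitch_fragments_helper_2 f_arr (stitch_fragments_helper_2 f_arr)

-- ===== LEMMAS AND PROOFS =====

-- canonical (forward Horner) hash of a char list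
def pH (l : List Char) : Int :=
  l.foldl (fun h c => PySem.Int.mod (h * hBase + (c.toNat : Int)) hMod) 0

theorem hMod_pos : (0 : Int) < hMod := by norm_num [hMod]

theorem pymod_eq (a : Int) : PySem.Int.mod a hMod = a % hMod :=
  PySem.Int.mod_eq_emod_of_pos hMod_pos

-- the same fold without the modulus
def rawH (l : List Char) (h : Int) : Int :=
  l.foldl (fun a c => a * hBase + (c.toNat : Int)) h

theorem rawH_shift (l : List Char) (h : Int) :
    rawH l h = h * hBase ^ l.length + rawH l 0 := by
  induction l generalizing h with
  | nil => simp [rawH]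
  | cons c l ih =>
    simp only [rawH, List.foldl_cons, List.length_cons] at *
    rw [ih (h * hBase + (c.toNat : Int)), ih ((0 : Int) * hBase + (c.toNat : Int))]
    ring

theorem modmul (x c : Int) : ((x % hMod) * hBase + c) % hMod = (x * hBase + c) % hMod := by
  conv_lhs => rw [Int.add_emod, Int.mul_emod, Int.emod_emod_of_dvd x dvd_rfl]
  conv_rhs => rw [Int.add_emod, Int.mul_emod]

theorem modcomb (a p b : Int) : (a * (p % hMod) + b % hMod) % hMod = (a * p + b) % hMod := by
  conv_lhs => rw [Int.add_emod, Int.mul_emod, Int.emod_emod_of_dvd p dvd_rfl,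
    Int.emod_emod_of_dvd b dvd_rfl]
  conv_rhs => rw [Int.add_emod, Int.mul_emod]

theorem modpow (k : Nat) : (hBase ^ k % hMod) * hBase % hMod = hBase ^ (k + 1) % hMod := by
  conv_lhs => rw [Int.mul_emod, Int.emod_emod_of_dvd (hBase ^ k) dvd_rfl, ← Int.mul_emod]
  rw [pow_succ]

theorem pH_eq_rawH_mod (l : List Char) (x : Int) :
    l.foldl (fun h c => PySem.Int.mod (h * hBase + (c.toNat : Int)) hMod) (x % hMod)
      = rawH l x % hMod := by
  induction l generalizing x with
  | nil => simp [rawH]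
  | cons c l ih =>
    simp only [List.foldl_cons, rawH] at *
    rw [pymod_eq, modmul, ih (x * hBase + (c.toNat : Int))]

theorem pH_eq_raw (l : List Char) : pH l = rawH l 0 % hMod := by
  have h := pH_eq_rawH_mod l 0
  rwa [Int.zero_emod] at h

theorem pH_append (l : List Char) (c : Char) :
    pH (l ++ [c]) = PySem.Int.mod (pH l * hBase + (c.toNat : Int)) hMod := by
  simp [pH, List.foldl_append]

theorem pH_cons (l : List Char) (c : Char) :
    pH (c :: l) = ((c.toNat : Int) * (hBase ^ l.length % hMod) + pH l) % hMod := by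
  rw [pH_eq_raw (c :: l), pH_eq_raw l, modcomb]
  have h := rawH_shift l ((c.toNat : Int))
  simp only [rawH, List.foldl_cons] at *
  rw [show ((0 : Int) * hBase + (c.toNat : Int)) = (c.toNat : Int) by ring, h]

theorem getLast!_concat (l : List Int) (x : Int) : (l ++ [x]).getLast! = x := by
  rw [List.getLast!_eq_getLast?_getD, List.getLast?_concat]
  rfl

theorem range_map_getD (f : Nat → Int) (n k : Nat) (hk : k ≤ n) (d : Int) :
    ((List.range (n + 1)).map f).getD k d = f k := by
  rw [List.getD_eq_getElem?_getD]
  simp [List.getElem?_range, Nat.lt_succ_of_le hk]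

theorem phashArr_eq (s : List Char) :
    phashArr s = (List.range (s.length + 1)).map (fun k => pH (s.take k)) := by
  induction s using List.reverseRecOn with
  | nil => simp [phashArr, pH, List.range_succ]
  | append_singleton s c ih =>
    unfold phashArr at ih ⊢
    rw [List.foldl_append, List.foldl_cons, List.foldl_nil, ih]
    have hlast : ((List.range (s.length + 1)).map (fun k => pH (s.take k))).getLast! = pH s := by
      rw [List.range_succ, List.map_append, List.map_cons, List.map_nil, getLast!_concat,
        List.take_length]
    rw [hlast,
      show PySem.Int.mod (pH s * hBase + (c.toNat : Int)) hMod = pH (s ++ [c]) from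
        (pH_append s c).symm,
      show (s ++ [c]).length = s.length + 1 by simp]
    rw [List.range_succ (n := s.length + 1), List.map_append, List.map_cons, List.map_nil]
    congr 1
    · apply List.map_congr_left
      intro k hk
      rw [List.mem_range] at hk
      rw [List.take_append_of_le_length (by omega)]
    · rw [show s.length + 1 = (s ++ [c]).length by simp, List.take_length]

theorem shash_state (s : List Char) :
    s.reverse.foldl (fun hp c =>
        (hp.1 ++ [PySem.Int.mod ((c.toNat : Int) * hp.2 + hp.1.getLast!) hMod],
         PySem.Int.mod (hp.2 * hBase) hMod)) (([0], 1) : List Int × Int)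
      = ((List.range (s.length + 1)).map (fun k => pH (s.drop (s.length - k))),
         hBase ^ s.length % hMod) := by
  induction s with
  | nil =>
    rw [List.reverse_nil, List.foldl_nil, Prod.mk.injEq]
    refine ⟨by simp [pH, List.range_succ], ?_⟩
    rw [List.length_nil, pow_zero]
    exact (Int.emod_eq_of_lt (by norm_num) (by norm_num [hMod])).symm
  | cons c s ih =>
    rw [List.reverse_cons, List.foldl_append, ih, List.foldl_cons, List.foldl_nil]
    dsimp only
    rw [Prod.mk.injEq]
    constructor
    · have hlast : ((List.range (s.length + 1)).map
          (fun k => pH (s.drop (s.length - k)))).getLast! = pH s := by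
        rw [List.range_succ, List.map_append, List.map_cons, List.map_nil, getLast!_concat,
          Nat.sub_self, List.drop_zero]
      rw [hlast, pymod_eq,
        show ((c.toNat : Int) * (hBase ^ s.length % hMod) + pH s) % hMod = pH (c :: s) from
          (pH_cons s c).symm]
      rw [show (c :: s).length = s.length + 1 from rfl]
      rw [List.range_succ (n := s.length + 1), List.map_append, List.map_cons, List.map_nil]
      congr 1
      · apply List.map_congr_left
        intro k hk
        rw [List.mem_range] at hk
        rw [show s.length + 1 - k = (s.length - k) + 1 by omega, List.drop_succ_cons]
      · rw [Nat.sub_self, List.drop_zero]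
    · rw [pymod_eq, modpow]
      rfl

theorem shashArr_eq (s : List Char) :
    shashArr s = (List.range (s.length + 1)).map (fun k => pH (s.drop (s.length - k))) := by
  unfold shashArr
  rw [shash_state]

theorem infix_eq_of_length {l t : List Char} (h : l <:+: t) (hl : l.length = t.length) :
    l = t := h.eq_of_length hl

theorem hfp_getD (frag : List Char) (i : Nat) (hi : i ≤ frag.length) :
    (phashArr frag).getD i 0 = pH (frag.take i) := by
  rw [phashArr_eq, range_map_getD _ _ _ hi]

theorem hrs_getD (res : List Char) (k i : Nat) (hk : k ≤ res.length) (hi : i ≤ k) :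
    (shashArr (res.drop (res.length - k))).getD i 0 = pH (res.drop (res.length - i)) := by
  rw [shashArr_eq]
  have hlen : (res.drop (res.length - k)).length = k := by
    rw [List.length_drop]; omega
  rw [hlen, range_map_getD _ _ _ hi, List.drop_drop]
  congr 2
  omega

theorem hrp_getD (res : List Char) (k j : Nat) (hk : k ≤ res.length) (hj : j ≤ k) :
    (phashArr (res.take k)).getD j 0 = pH (res.take j) := by
  have hlen : (res.take k).length = k := by
    rw [List.length_take]; omega
  rw [phashArr_eq, hlen, range_map_getD _ _ _ hj, List.take_take, Nat.min_eq_left hj]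

theorem hfs_getD (frag : List Char) (j : Nat) (hj : j ≤ frag.length) :
    (shashArr frag).getD j 0 = pH (frag.drop (frag.length - j)) := by
  have h := hrs_getD frag frag.length j le_rfl hj
  rwa [Nat.sub_self, List.drop_zero] at h

theorem back_loop_eq (frag res : List Char) :
    ∀ i, i ≤ min frag.length res.length →
      hfBackLoop res frag i
        = altBackLoop frag res (phashArr frag)
            (shashArr (res.drop (res.length - min frag.length res.length))) i := by
  intro i
  induction i with
  | zero => intro _; rfl
  | succ i ih =>
    intro h
    have hn : i + 1 ≤ frag.length := le_trans h (Nat.min_le_left _ _)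
    have hm : i + 1 ≤ res.length := le_trans h (Nat.min_le_right _ _)
    rw [hfBackLoop, altBackLoop]
    rw [PySem.List.slice_to_natCast frag (i + 1),
      PySem.List.slice_from_neg_natCast res (i + 1) (by omega)]
    have hlt : (frag.take (i + 1)).length = i + 1 := by rw [List.length_take]; omega
    have hld : (res.drop (res.length - (i + 1))).length = i + 1 := by
      rw [List.length_drop]; omega
    by_cases heq : frag.take (i + 1) = res.drop (res.length - (i + 1))
    · have hin : PySem.Chars.isIn (frag.take (i + 1)) (res.drop (res.length - (i + 1))) = true :=
        (PySem.Chars.isIn_iff_infix _ _).mpr (heq ▸ List.infix_refl _)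
      have hh : (phashArr frag).getD (i + 1) 0
          = (shashArr (res.drop (res.length - min frag.length res.length))).getD (i + 1) 0 := by
        rw [hfp_getD frag _ hn, hrs_getD res _ _ (Nat.min_le_right _ _) h, heq]
      rw [hin, hh]
      simp [heq]
    · have hin : PySem.Chars.isIn (frag.take (i + 1)) (res.drop (res.length - (i + 1))) = false := by
        rw [PySem.Chars.isIn_eq_false_iff]
        intro hinf
        exact heq (infix_eq_of_length hinf (by rw [hlt, hld]))
      have hb : (frag.take (i + 1) == res.drop (res.length - (i + 1))) = false := by
        simp [heq]
      rw [hin, hb]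
      simp only [Bool.and_false, Bool.false_eq_true, if_false]
      exact ih (by omega)

theorem back_desc_aux (frag res : List Char) :
    ∀ d, min frag.length res.length + d ≤ frag.length →
      hfBackLoop res frag (min frag.length res.length + d)
        = hfBackLoop res frag (min frag.length res.length) := by
  intro d
  induction d with
  | zero => intro _; rfl
  | succ d ih =>
    intro h
    have hm : res.length ≤ min frag.length res.length + d := by omega
    rw [show min frag.length res.length + (d + 1) = (min frag.length res.length + d) + 1 by omega]
    rw [hfBackLoop]
    rw [PySem.List.slice_to_natCast frag (min frag.length res.length + d + 1),
      PySem.List.slice_from_neg_natCast res (min frag.length res.length + d + 1) (by omega)]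
    rw [show res.length - (min frag.length res.length + d + 1) = 0 by omega, List.drop_zero]
    have hin : PySem.Chars.isIn (frag.take (min frag.length res.length + d + 1)) res = false := by
      rw [PySem.Chars.isIn_eq_false_iff]
      intro hinf
      have hle := hinf.length_le
      rw [List.length_take] at hle
      omega
    rw [hin]
    simp only [Bool.false_eq_true, if_false]
    exact ih (by omega)

theorem back_desc (frag res : List Char) :
    hfBackLoop res frag frag.length = hfBackLoop res frag (min frag.length res.length) := by
  have h := back_desc_aux frag res (frag.length - min frag.length res.length) (by omega)
  rwa [show min frag.length res.length + (frag.length - min frag.length res.length)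
    = frag.length by omega] at h

theorem front_loop_eq (frag res : List Char) (j : Nat) (hj : 1 ≤ j) :
    hfFrontLoop res frag j
      = altFrontLoop frag res (shashArr frag)
          (phashArr (res.take (min frag.length res.length))) j := by
  rw [hfFrontLoop, altFrontLoop]
  by_cases hlt : j < frag.length
  · rw [dif_pos hlt, dif_pos hlt]
    rw [PySem.List.slice_from_neg_natCast frag j (by omega), PySem.List.slice_to_natCast res j]
    have hlsub : (frag.drop (frag.length - j)).length = j := by
      rw [List.length_drop]; omega
    by_cases hm : j ≤ res.length
    · have hltk : (res.take j).length = j := by rw [List.length_take]; omega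
      by_cases heq : frag.drop (frag.length - j) = res.take j
      · have hin : PySem.Chars.isIn (frag.drop (frag.length - j)) (res.take j) = true :=
          (PySem.Chars.isIn_iff_infix _ _).mpr (heq ▸ List.infix_refl _)
        have hh : (shashArr frag).getD j 0
            = (phashArr (res.take (min frag.length res.length))).getD j 0 := by
          rw [hfs_getD frag j (by omega),
            hrp_getD res (min frag.length res.length) j (Nat.min_le_right _ _) (by omega), heq]
        rw [hin, hh]
        simp [heq, hm]
      · have hin : PySem.Chars.isIn (frag.drop (frag.length - j)) (res.take j) = false := by
          rw [PySem.Chars.isIn_eq_false_iff]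
          intro hinf
          exact heq (infix_eq_of_length hinf (by rw [hlsub, hltk]))
        have hb : (frag.drop (frag.length - j) == res.take j) = false := by simp [heq]
        rw [hin, hb]
        simp only [Bool.and_false, Bool.false_eq_true, if_false]
        exact front_loop_eq frag res (j + 1) (by omega)
    · have hin : PySem.Chars.isIn (frag.drop (frag.length - j)) (res.take j) = false := by
        rw [PySem.Chars.isIn_eq_false_iff]
        intro hinf
        have hle := hinf.length_le
        rw [hlsub, List.length_take] at hle
        omega
      have hd : (decide (j ≤ res.length)) = false := by simp [hm]
      rw [hin, hd]
      simp only [Bool.false_and, Bool.false_eq_true, if_false]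
      exact front_loop_eq frag res (j + 1) (by omega)
  · rw [dif_neg hlt, dif_neg hlt]
termination_by frag.length - j

theorem front_start (frag res : List Char) (hne : frag ≠ []) :
    hfFrontLoop res frag 0 = hfFrontLoop res frag 1 := by
  rw [hfFrontLoop]
  have hn : 0 < frag.length := List.length_pos_iff.mpr hne
  rw [dif_pos hn]
  have hin : PySem.Chars.isIn (PySem.List.slice frag (some (-((0 : Nat) : Int))) none)
      (PySem.List.slice res none (some ((0 : Nat) : Int))) = false := by
    rw [show (-((0 : Nat) : Int)) = ((0 : Nat) : Int) by norm_num,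
      PySem.List.slice_from_natCast frag 0, List.drop_zero,
      PySem.List.slice_to_natCast res 0, List.take_zero]
    rw [PySem.Chars.isIn_eq_false_iff]
    intro hinf
    have hle := hinf.length_le
    exact hne (by cases frag <;> simp_all)
  rw [hin]
  simp only [Bool.false_eq_true, if_false]

theorem back_le (frag res : List Char) (hfp hrs : List Int) :
    ∀ i, altBackLoop frag res hfp hrs i ≤ i := by
  intro i
  induction i with
  | zero => exact le_rfl
  | succ i ih =>
    rw [altBackLoop]
    split
    · exact le_rfl
    · exact le_trans ih (by omega)

theorem front_ge (frag res : List Char) (hfs hrp : List Int) (j : Nat) :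
    j ≤ altFrontLoop frag res hfs hrp j := by
  rw [altFrontLoop]
  by_cases hlt : j < frag.length
  · rw [dif_pos hlt]
    split
    · exact le_rfl
    · exact le_trans (by omega) (front_ge frag res hfs hrp (j + 1))
  · rw [dif_neg hlt]
termination_by frag.length - j

theorem front_le (frag res : List Char) (hfs hrp : List Int) (j : Nat)
    (h : j ≤ frag.length) : altFrontLoop frag res hfs hrp j ≤ frag.length := by
  rw [altFrontLoop]
  by_cases hlt : j < frag.length
  · rw [dif_pos hlt]
    split
    · exact h
    · exact front_le frag res hfs hrp (j + 1) (by omega)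
  · rw [dif_neg hlt]; exact h
termination_by frag.length - j

theorem helper_fragment_eq (main frag : List Char)
    (h : PySem.Chars.isIn frag main = false) :
    helper_fragment main frag
      = (if (PySem.List.slice frag none (some (-((hfFrontLoop main frag 0 : Nat) : Int)))).length
            < (PySem.List.slice frag (some ((hfBackLoop main frag frag.length : Nat) : Int)) none).length
           ∧ PySem.List.slice frag none (some (-((hfFrontLoop main frag 0 : Nat) : Int))) ≠ []
         then (("front" : String),
              PySem.List.slice frag none (some (-((hfFrontLoop main frag 0 : Nat) : Int))),
              ((hfFrontLoop main frag 0 : Nat) : Int))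
         else (("back" : String),
              PySem.List.slice frag (some ((hfBackLoop main frag frag.length : Nat) : Int)) none,
              ((hfBackLoop main frag frag.length : Nat) : Int))) := by
  unfold helper_fragment
  rw [if_neg (by simp [h])]

theorem step_eq' (res frag : List Char) :
    (if (helper_fragment res frag).1 = "back"
     then res ++ (helper_fragment res frag).2.1
     else (helper_fragment res frag).2.1 ++ res)
    = (if PySem.Chars.isIn frag res then res
       else
         if altFrontLoop frag res (shashArr frag)
              (phashArr (res.take (min frag.length res.length))) 1 < frag.length
            ∧ frag.length - altFrontLoop frag res (shashArr frag)
                (phashArr (res.take (min frag.length res.length))) 1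
              < frag.length - altBackLoop frag res (phashArr frag)
                  (shashArr (res.drop (res.length - min frag.length res.length)))
                  (min frag.length res.length)
         then frag.take (frag.length - altFrontLoop frag res (shashArr frag)
                (phashArr (res.take (min frag.length res.length))) 1) ++ res
         else res ++ frag.drop (altBackLoop frag res (phashArr frag)
                (shashArr (res.drop (res.length - min frag.length res.length)))
                (min frag.length res.length))) := by
  by_cases hin : PySem.Chars.isIn frag res = true
  · rw [if_pos hin]
    unfold helper_fragment
    rw [if_pos hin]
    simp
  · have hinf : PySem.Chars.isIn frag res = false := by
      revert hin; cases PySem.Chars.isIn frag res <;> simp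
    have hne : frag ≠ [] := by
      intro h
      rw [h, PySem.Chars.isIn_nil] at hinf
      cases hinf
    rw [if_neg hin, helper_fragment_eq res frag hinf]
    have hj0 : hfFrontLoop res frag 0
        = altFrontLoop frag res (shashArr frag)
            (phashArr (res.take (min frag.length res.length))) 1 := by
      rw [front_start frag res hne, front_loop_eq frag res 1 le_rfl]
    have hi0 : hfBackLoop res frag frag.length
        = altBackLoop frag res (phashArr frag)
            (shashArr (res.drop (res.length - min frag.length res.length)))
            (min frag.length res.length) := by
      rw [back_desc frag res, back_loop_eq frag res _ le_rfl]
    set jB := altFrontLoop frag res (shashArr frag)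
        (phashArr (res.take (min frag.length res.length))) 1 with hjB
    set iB := altBackLoop frag res (phashArr frag)
        (shashArr (res.drop (res.length - min frag.length res.length)))
        (min frag.length res.length) with hiB
    have hnpos : 0 < frag.length := List.length_pos_iff.mpr hne
    have hjge : 1 ≤ jB := hjB ▸ front_ge frag res _ _ 1
    have hjle : jB ≤ frag.length := hjB ▸ front_le frag res _ _ 1 (by omega)
    have hile : iB ≤ min frag.length res.length := hiB ▸ back_le frag res _ _ _
    rw [hj0, hi0]
    rw [PySem.List.slice_to_neg_natCast frag jB (by omega), PySem.List.slice_from_natCast frag iB]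
    have hlen1 : (frag.take (frag.length - jB)).length = frag.length - jB := by
      rw [List.length_take]; omega
    have hlen2 : (frag.drop iB).length = frag.length - iB := List.length_drop
    have hlen3 : frag.take (frag.length - jB) ≠ [] ↔ jB < frag.length := by
      rw [← List.length_pos_iff, hlen1]
      omega
    have hiff : ((frag.take (frag.length - jB)).length < (frag.drop iB).length
          ∧ frag.take (frag.length - jB) ≠ [])
        ↔ (jB < frag.length ∧ frag.length - jB < frag.length - iB) := by
      rw [hlen1, hlen2, hlen3]
      constructor
      · rintro ⟨h1, h2⟩; exact ⟨h2, h1⟩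
      · rintro ⟨h1, h2⟩; exact ⟨h2, h1⟩
    by_cases hc : jB < frag.length ∧ frag.length - jB < frag.length - iB
    · rw [if_pos (hiff.mpr hc), if_pos hc]
      rw [if_neg (by decide : ¬ ("front" : String) = "back")]
    · rw [if_neg (fun h => hc (hiff.mp h)), if_neg hc]
      rw [if_pos (rfl : ("back" : String) = "back")]

theorem step_eq (res : List Char) (frag0 : String) :
    (let t := helper_fragment res frag0.toList
     if t.1 = "back" then res ++ t.2.1 else t.2.1 ++ res)
    = (let frag := frag0.toList
       if PySem.Chars.isIn frag res then res
       else
         let n := frag.length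
         let m := res.length
         let k := min n m
         let hfp := phashArr frag
         let hfs := shashArr frag
         let hrp := phashArr (res.take k)
         let hrs := shashArr (res.drop (m - k))
         let i := altBackLoop frag res hfp hrs k
         let j := altFrontLoop frag res hfs hrp 1
         if j < n ∧ n - j < n - i then frag.take (n - j) ++ res
         else res ++ frag.drop i) :=
  step_eq' res frag0.toList

-- ===== VERDICT (by name: the statement is the Claim_ definition above) =====
theorem stitch_fragments_helper_2_spec : Claim_equal_stitch_fragments_helper_2 := by
  intro f_arr _
  unfold Spec_stitch_fragments_helper_2 stitch_fragments_helper_2 stitch_fragments_helper_2_alt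
  congr 1
  apply PySem.List.foldl_congr_mem
  intro acc x _
  exact step_eq acc x
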